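-- pv_equiv track=rewrite | github.com/richedperson1/DSA | revision2/binary_operator.py/left operator.py | posOfRightMostDiffBit
-- ===== SOURCE A (Python) =====
-- def posOfRightMostDiffBit(m,n):
--     if m==n:
--         return -1
--     count = 0
--     while m>0 and n>0:
--         if not(m&1 ==n&1):
--             count+=1
--
--         m = m>>1
--         n = n>>1
--
--     return count
-- ===== SOURCE B (Python) =====
-- def posOfRightMostDiffBit(m, n):
--     if m == n:
--         return -1
--     if m <= 0 or n <= 0:
--         return 0
--     bits_m = format(m, 'b')[::-1]
--     bits_n = format(n, 'b')[::-1]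
--     return sum(a != b for a, b in zip(bits_m, bits_n))
-- ===== Notes on version B (the rewrite author's own statement) =====
-- stated objective: alternative
-- what changed: Replaces the shift-and-compare while loop with pairing the two binary-digit strings from the least-significant end (zip of reversed format(.,'b')) and counting mismatched digit pairs.
import Mathlib
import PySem

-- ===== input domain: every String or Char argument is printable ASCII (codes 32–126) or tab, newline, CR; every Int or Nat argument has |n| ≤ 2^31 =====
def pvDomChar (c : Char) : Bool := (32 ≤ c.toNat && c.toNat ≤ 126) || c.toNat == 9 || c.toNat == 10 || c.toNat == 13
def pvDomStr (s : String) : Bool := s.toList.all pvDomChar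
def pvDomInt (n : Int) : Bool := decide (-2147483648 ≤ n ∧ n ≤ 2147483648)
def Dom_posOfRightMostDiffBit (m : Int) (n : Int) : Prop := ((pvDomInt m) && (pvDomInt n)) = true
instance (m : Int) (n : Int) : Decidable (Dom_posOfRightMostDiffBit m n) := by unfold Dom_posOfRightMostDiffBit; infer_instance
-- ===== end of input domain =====

-- B pairs the binary-digit strings of the two positive operands from the least
-- significant end and counts mismatched pairs, instead of A's shift-and-compare loop.

-- ===== PORT A =====
-- the while loop of A, on Int state (m, n, count); Python '>>' on Int = arithmetic
-- shift, exact here because the loop body only runs for m > 0 and n > 0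
def pvALoop (m n count : Int) : Int :=
  if h : 0 < m ∧ 0 < n then
    pvALoop (m / 2) (n / 2) (if ¬ (m % 2 = n % 2) then count + 1 else count)
  else count
termination_by m.toNat
decreasing_by omega

def posOfRightMostDiffBit (m : Int) (n : Int) : Int :=
  if m = n then -1
  else pvALoop m n 0

-- ===== PORT B =====
-- hand-written port of format(a, 'b') as a digit list, MSB first; exact for a ≥ 1
-- (only positive arguments reach it in posOfRightMostDiffBit_alt)
def pvFormatB (a : Nat) : List Char :=
  if a = 0 then [] else pvFormatB (a / 2) ++ [if a % 2 = 1 then '1' else '0']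
decreasing_by omega

def posOfRightMostDiffBit_alt (m : Int) (n : Int) : Int :=
  if m = n then -1
  else if m ≤ 0 ∨ n ≤ 0 then 0
  else
    let bitsM := (pvFormatB m.toNat).reverse   -- format(m, 'b')[::-1]
    let bitsN := (pvFormatB n.toNat).reverse
    ((bitsM.zip bitsN).countP (fun p => p.1 != p.2) : Int)

-- ===== PRECONDITION & SPEC =====
def Spec_posOfRightMostDiffBit (m : Int) (n : Int) (out : Int) : Prop := out = posOfRightMostDiffBit_alt m n
instance (m : Int) (n : Int) (out : Int) : Decidable (Spec_posOfRightMostDiffBit m n out) := by unfold Spec_posOfRightMostDiffBit; infer_instance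

-- ===== CLAIM (what is proved, stated in full; the proofs are below) =====
def Claim_equal_posOfRightMostDiffBit : Prop := ∀ (m : Int) (n : Int), Dom_posOfRightMostDiffBit m n → Spec_posOfRightMostDiffBit m n (posOfRightMostDiffBit m n)

-- ===== LEMMAS AND PROOFS =====

-- A's loop restated on Nat (both operands are nonnegative once the loop is entered)
def pvNLoop (a b : Nat) : Nat :=
  if a = 0 ∨ b = 0 then 0
  else (if a % 2 ≠ b % 2 then 1 else 0) + pvNLoop (a / 2) (b / 2)
decreasing_by omega

-- the binary digits LSB first
def pvLsb (a : Nat) : List Char :=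
  if a = 0 then [] else (if a % 2 = 1 then '1' else '0') :: pvLsb (a / 2)
decreasing_by omega

theorem pvFormatB_reverse (a : Nat) : (pvFormatB a).reverse = pvLsb a := by
  fun_induction pvFormatB a with
  | case1 => simp_all [pvLsb]
  | case2 a h ih => rw [pvLsb, if_neg h]; simp [ih]

theorem pvALoop_eq_nloop (m n count : Int) :
    pvALoop m n count = count + (pvNLoop m.toNat n.toNat : Int) := by
  fun_induction pvALoop m n count with
  | case1 m n count h ih =>
      rw [pvNLoop]
      have hne : ¬(m.toNat = 0 ∨ n.toNat = 0) := by omega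
      simp only [dite_eq_ite] at ih
      rw [if_neg hne, ih]
      have hm2 : (m / 2).toNat = m.toNat / 2 := by omega
      have hn2 : (n / 2).toNat = n.toNat / 2 := by omega
      rw [hm2, hn2]
      by_cases hp : m % 2 = n % 2
      · have hq : ¬(m.toNat % 2 ≠ n.toNat % 2) := by omega
        rw [if_neg (not_not_intro hp), if_neg hq]
        push_cast
        ring
      · have hq : m.toNat % 2 ≠ n.toNat % 2 := by omega
        rw [if_pos hp, if_pos hq]
        push_cast
        ring
  | case2 m n count h =>
      have hz : m.toNat = 0 ∨ n.toNat = 0 := by omega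
      rw [pvNLoop, if_pos hz]
      simp

theorem pvNLoop_eq_zipCount (a b : Nat) :
    pvNLoop a b = ((pvLsb a).zip (pvLsb b)).countP (fun p => p.1 != p.2) := by
  have h0 : pvLsb 0 = [] := by rw [pvLsb]; rfl
  fun_induction pvNLoop a b with
  | case1 a b h =>
      rcases h with h | h <;> subst h <;> simp [h0]
  | case2 a b h ih =>
      have ha : a ≠ 0 := by tauto
      have hb : b ≠ 0 := by tauto
      have hA : pvLsb a = (if a % 2 = 1 then '1' else '0') :: pvLsb (a / 2) := by
        rw [pvLsb, if_neg ha]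
      have hB : pvLsb b = (if b % 2 = 1 then '1' else '0') :: pvLsb (b / 2) := by
        rw [pvLsb, if_neg hb]
      rw [hA, hB]
      simp only [List.zip_cons_cons, List.countP_cons, ← ih]
      have hma := Nat.mod_two_eq_zero_or_one a
      have hmb := Nat.mod_two_eq_zero_or_one b
      by_cases hp : a % 2 = b % 2
      · rcases hma with h1 | h1 <;> rw [h1] at hp ⊢ <;> rw [← hp] <;> simp
      · rcases hma with h1 | h1 <;> rcases hmb with h2 | h2 <;>
          rw [h1, h2] <;> simp_all <;> omega

-- ===== VERDICT (by name: the statement is the Claim_ definition above) =====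
theorem posOfRightMostDiffBit_spec : Claim_equal_posOfRightMostDiffBit := by
  intro m n _
  unfold Spec_posOfRightMostDiffBit posOfRightMostDiffBit posOfRightMostDiffBit_alt
  by_cases hmn : m = n
  · simp [hmn]
  · simp only [hmn, if_false]
    rw [pvALoop_eq_nloop]
    by_cases hz : m ≤ 0 ∨ n ≤ 0
    · rw [if_pos hz]
      have hz' : m.toNat = 0 ∨ n.toNat = 0 := by omega
      rw [pvNLoop, if_pos hz']
      simp
    · rw [if_neg hz, pvFormatB_reverse, pvFormatB_reverse, pvNLoop_eq_zipCount]
      simp
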